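-- pv_equiv track=rewrite | github.com/rjherrera/IIC1103 | Labs/L11/4.py | camion
-- ===== SOURCE A (Python) =====
-- def camion(precio, volumen, cosas):
--     suma_precio = 0
--     suma_volumen = 0
--     for i, j in cosas:
--         suma_volumen += i
--         suma_precio += j
--     if suma_precio > precio and suma_volumen < volumen:
--         return True
--     for i in range(len(cosas)):
--         if camion(precio, volumen, cosas[:i] + cosas[i + 1:]):
--             return True
--     return False
-- ===== SOURCE B (Python) =====
-- def camion(precio, volumen, cosas):
--     # Iterative include/exclude DFS over the items with sound bound pruning:
--     # maxp[i] = best possible price gain from items i.., minv[i] = best possible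
--     # volume gain from items i.. .  Exact for arbitrary (negative) values.
--     n = len(cosas)
--     maxp = [0] * (n + 1)
--     minv = [0] * (n + 1)
--     for i in range(n - 1, -1, -1):
--         v, p = cosas[i]
--         maxp[i] = maxp[i + 1] + (p if p > 0 else 0)
--         minv[i] = minv[i + 1] + (v if v < 0 else 0)
--     stack = [(0, 0, 0)]
--     while stack:
--         i, v, p = stack.pop()
--         if p + maxp[i] <= precio or v + minv[i] >= volumen:
--             continue
--         if i == n:
--             return True
--         vi, pi = cosas[i]
--         stack.append((i + 1, v, p))        # exclude cosas[i]
--         stack.append((i + 1, v + vi, p + pi))  # include cosas[i] (explored first)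
--     return False
-- ===== Notes on version B (the rewrite author's own statement) =====
-- stated objective: alternative
-- what changed: Replaced A's remove-one-element recursion (which re-explores the same subsets many times) by a single explicit-stack include/exclude DFS over the items with sound suffix-bound pruning (best achievable remaining price / volume); exact for arbitrary negative values, where an integer-indexed knapsack table would not be; the problem is NP-hard, so both keep exponential worst cases and a timing run label varies with the instance.
import Mathlib
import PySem

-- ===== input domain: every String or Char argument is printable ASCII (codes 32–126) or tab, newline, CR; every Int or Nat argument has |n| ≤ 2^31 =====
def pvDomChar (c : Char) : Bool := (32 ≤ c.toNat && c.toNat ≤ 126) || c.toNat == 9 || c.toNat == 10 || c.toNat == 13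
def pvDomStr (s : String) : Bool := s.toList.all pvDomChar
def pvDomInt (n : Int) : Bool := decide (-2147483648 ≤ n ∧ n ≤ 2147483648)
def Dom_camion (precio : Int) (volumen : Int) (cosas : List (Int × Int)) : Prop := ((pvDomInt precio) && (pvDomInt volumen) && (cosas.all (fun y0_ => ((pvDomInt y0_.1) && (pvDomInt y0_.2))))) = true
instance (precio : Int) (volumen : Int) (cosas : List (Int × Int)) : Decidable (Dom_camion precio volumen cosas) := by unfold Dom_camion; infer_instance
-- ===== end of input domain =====

-- B replaces A's remove-one-element recursion over subsets (which revisits the same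
-- subsets over and over) by one explicit-stack include/exclude DFS with sound bound pruning.

-- ===== PORT A =====
-- cosas[:i] + cosas[i+1:] with 0 ≤ i < len(cosas) is exactly take i ++ drop (i+1).
def camion (precio : Int) (volumen : Int) (cosas : List (Int × Int)) : Bool :=
  -- the loop keeps (suma_volumen, suma_precio)
  let s := cosas.foldl (fun (s : Int × Int) (x : Int × Int) => (s.1 + x.1, s.2 + x.2)) (0, 0)
  if s.2 > precio ∧ s.1 < volumen then true
  else (List.range cosas.length).attach.any
    (fun i => camion precio volumen (cosas.take i.1 ++ cosas.drop (i.1 + 1)))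
termination_by cosas.length
decreasing_by
  have hi : i.1 < cosas.length := List.mem_range.mp i.2
  simp only [List.length_append, List.length_take, List.length_drop]
  omega

-- ===== PORT B =====
-- Source B indexes the remaining items by i and reads bounds from the suffix arrays
-- maxp/minv; the port carries the suffix cosas[i:] itself and computes the same
-- two suffix bounds from it (maxpB r = maxp[i], minvB r = minv[i] for r = cosas[i:]).
def maxpB : List (Int × Int) → Int
  | [] => 0
  | c :: r => (if c.2 > 0 then c.2 else 0) + maxpB r

def minvB : List (Int × Int) → Int
  | [] => 0
  | c :: r => (if c.1 < 0 then c.1 else 0) + minvB r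

-- the while loop over the explicit stack; each entry is (remaining items, v, p)
def dfsB (precio : Int) (volumen : Int) : List (List (Int × Int) × Int × Int) → Bool
  | [] => false
  | (r, v, p) :: st =>
    if p + maxpB r ≤ precio ∨ volumen ≤ v + minvB r then dfsB precio volumen st
    else
      match r with
      | [] => true
      | c :: r' => dfsB precio volumen ((r', v + c.1, p + c.2) :: (r', v, p) :: st)
termination_by st => (st.map (fun e => 3 ^ e.1.length)).sum
decreasing_by
  · simp only [List.map_cons, List.sum_cons]
    have h1 : 1 ≤ 3 ^ r.length := Nat.one_le_pow _ _ (by norm_num)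
    omega
  · simp only [List.map_cons, List.sum_cons, List.length_cons, pow_succ]
    have h1 : 1 ≤ 3 ^ r'.length := Nat.one_le_pow _ _ (by norm_num)
    omega

def camion_alt (precio : Int) (volumen : Int) (cosas : List (Int × Int)) : Bool :=
  dfsB precio volumen [(cosas, 0, 0)]

-- ===== PRECONDITION & SPEC =====
def Spec_camion (precio : Int) (volumen : Int) (cosas : List (Int × Int)) (out : Bool) : Prop := out = camion_alt precio volumen cosas
instance (precio : Int) (volumen : Int) (cosas : List (Int × Int)) (out : Bool) : Decidable (Spec_camion precio volumen cosas out) := by unfold Spec_camion; infer_instance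

-- ===== CLAIM (what is proved, stated in full; the proofs are below) =====
def Claim_equal_camion : Prop := ∀ (precio : Int) (volumen : Int) (cosas : List (Int × Int)), Dom_camion precio volumen cosas → Spec_camion precio volumen cosas (camion precio volumen cosas)

-- ===== LEMMAS AND PROOFS =====

-- A's two running sums, in one foldl, equal init + (sum of volumes, sum of prices).
theorem foldl_pairsum (l : List (Int × Int)) (s : Int × Int) :
    l.foldl (fun (s : Int × Int) (x : Int × Int) => (s.1 + x.1, s.2 + x.2)) s
      = (s.1 + (l.map Prod.fst).sum, s.2 + (l.map Prod.snd).sum) := by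
  induction l generalizing s with
  | nil => simp
  | cons a t ih =>
    simp only [List.foldl_cons, ih, List.map_cons, List.sum_cons]
    simp only [Prod.mk.injEq]
    exact ⟨by ring, by ring⟩

-- A proper sublist remains a sublist after erasing some index.
theorem sublist_eraseIdx_of_ne {α : Type} {l m : List α} (h : l.Sublist m) (hne : l ≠ m) :
    ∃ i, i < m.length ∧ l.Sublist (m.eraseIdx i) := by
  induction h with
  | slnil => exact absurd rfl hne
  | @cons l' m' a h ih => exact ⟨0, by simp, by simpa using h⟩
  | @cons₂ l' m' a h ih =>
    by_cases he : l' = m'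
    · exact absurd (by rw [he]) hne
    · obtain ⟨i, hi, hsub⟩ := ih he
      exact ⟨i + 1, by simp; omega, by simpa [List.eraseIdx] using hsub.cons₂ a⟩

-- the characterisation both ports are reduced to
def GoodSub (precio volumen : Int) (r : List (Int × Int)) (v p : Int) : Prop :=
  ∃ l : List (Int × Int), l.Sublist r ∧
    p + (l.map Prod.snd).sum > precio ∧ v + (l.map Prod.fst).sum < volumen

-- soundness of the two pruning bounds
theorem sum_snd_le_maxpB {l r : List (Int × Int)} (h : l.Sublist r) :
    (l.map Prod.snd).sum ≤ maxpB r := by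
  induction h with
  | slnil => simp [maxpB]
  | @cons l' m' a h ih =>
    simp only [maxpB]
    have : (0 : Int) ≤ if a.2 > 0 then a.2 else 0 := by split <;> omega
    omega
  | @cons₂ l' m' a h ih =>
    simp only [maxpB, List.map_cons, List.sum_cons]
    have : a.2 ≤ if a.2 > 0 then a.2 else 0 := by split <;> omega
    omega

theorem minvB_le_sum_fst {l r : List (Int × Int)} (h : l.Sublist r) :
    minvB r ≤ (l.map Prod.fst).sum := by
  induction h with
  | slnil => simp [minvB]
  | @cons l' m' a h ih =>
    simp only [minvB]
    have : (if a.1 < 0 then a.1 else 0) ≤ (0 : Int) := by split <;> omega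
    omega
  | @cons₂ l' m' a h ih =>
    simp only [minvB, List.map_cons, List.sum_cons]
    have : (if a.1 < 0 then a.1 else 0) ≤ a.1 := by split <;> omega
    omega

-- the DFS returns true iff some stack entry still leads to a good subset
theorem dfsB_iff (precio volumen : Int) (st : List (List (Int × Int) × Int × Int)) :
    dfsB precio volumen st = true ↔
      ∃ e ∈ st, GoodSub precio volumen e.1 e.2.1 e.2.2 := by
  induction st using dfsB.induct precio volumen with
  | case1 => simp [dfsB]
  | case2 r v p st hprune ih =>
    rw [dfsB.eq_def]
    simp only [if_pos hprune]
    rw [ih]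
    constructor
    · rintro ⟨e, he, hg⟩; exact ⟨e, List.mem_cons_of_mem _ he, hg⟩
    · rintro ⟨e, he, hg⟩
      rcases List.mem_cons.mp he with rfl | he'
      · exfalso
        dsimp only at hg
        obtain ⟨l, hl, h1, h2⟩ := hg
        have hb1 := sum_snd_le_maxpB hl
        have hb2 := minvB_le_sum_fst hl
        rcases hprune with h | h <;> omega
      · exact ⟨e, he', hg⟩
  | case3 v p st hprune =>
    rw [dfsB.eq_def]
    simp only [if_neg hprune, true_iff]
    push Not at hprune
    simp only [maxpB, minvB] at hprune
    exact ⟨(([] : List (Int × Int)), v, p), List.mem_cons_self,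
      ⟨[], List.Sublist.refl _, by simp; omega, by simp; omega⟩⟩
  | case4 v p st c r' hprune ih =>
    rw [dfsB.eq_def]
    simp only [if_neg hprune]
    rw [ih]
    constructor
    · rintro ⟨e, he, hg⟩
      rcases List.mem_cons.mp he with rfl | he'
      · dsimp only at hg
        obtain ⟨l, hl, h1, h2⟩ := hg
        refine ⟨(c :: r', v, p), List.mem_cons_self, c :: l, hl.cons₂ c, ?_, ?_⟩ <;>
          simp only [List.map_cons, List.sum_cons] <;> omega
      · rcases List.mem_cons.mp he' with rfl | he''
        · dsimp only at hg
          obtain ⟨l, hl, h1, h2⟩ := hg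
          exact ⟨(c :: r', v, p), List.mem_cons_self, l, hl.cons c, h1, h2⟩
        · exact ⟨e, List.mem_cons_of_mem _ he'', hg⟩
    · rintro ⟨e, he, hg⟩
      rcases List.mem_cons.mp he with rfl | he'
      · dsimp only at hg
        obtain ⟨l, hl, h1, h2⟩ := hg
        rcases List.sublist_cons_iff.mp hl with h | ⟨l', rfl, hl'⟩
        · exact ⟨(r', v, p), by simp, l, h, h1, h2⟩
        · refine ⟨(r', v + c.1, p + c.2), List.mem_cons_self, l', hl', ?_, ?_⟩ <;>
            simp only [List.map_cons, List.sum_cons] at h1 h2 <;> dsimp only <;> omega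
      · exact ⟨e, by simp [he'], hg⟩

theorem camion_alt_iff (precio volumen : Int) (cosas : List (Int × Int)) :
    camion_alt precio volumen cosas = true ↔
      ∃ l : List (Int × Int), l.Sublist cosas ∧
        (l.map Prod.snd).sum > precio ∧ (l.map Prod.fst).sum < volumen := by
  rw [camion_alt, dfsB_iff]
  constructor
  · rintro ⟨e, he, l, hl, h1, h2⟩
    simp only [List.mem_singleton] at he; subst he
    exact ⟨l, hl, by simpa using h1, by simpa using h2⟩
  · rintro ⟨l, hl, h1, h2⟩
    exact ⟨(cosas, 0, 0), List.mem_cons_self, l, hl, by simpa using h1, by simpa using h2⟩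

theorem camion_iff_aux (precio volumen : Int) (n : ℕ) :
    ∀ cosas : List (Int × Int), cosas.length ≤ n →
      (camion precio volumen cosas = true ↔
        ∃ l : List (Int × Int), l.Sublist cosas ∧
          (l.map Prod.snd).sum > precio ∧ (l.map Prod.fst).sum < volumen) := by
  induction n with
  | zero =>
    intro cosas hlen
    have : cosas = [] := List.eq_nil_of_length_eq_zero (Nat.le_zero.mp hlen)
    subst this
    rw [camion]
    simp
  | succ n ih =>
    intro cosas hlen
    rw [camion]
    simp only [foldl_pairsum, zero_add]
    by_cases hc : (cosas.map Prod.snd).sum > precio ∧ (cosas.map Prod.fst).sum < volumen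
    · simp only [if_pos hc, true_iff]
      exact ⟨cosas, List.Sublist.refl _, hc.1, hc.2⟩
    · rw [if_neg hc]
      rw [List.any_eq_true]
      constructor
      · rintro ⟨⟨i, hi⟩, _, hcam⟩
        have hilt : i < cosas.length := List.mem_range.mp hi
        rw [← List.eraseIdx_eq_take_drop_succ] at hcam
        have hlen' : (cosas.eraseIdx i).length ≤ n := by
          rw [List.length_eraseIdx_of_lt hilt]; omega
        obtain ⟨l, hl, hgood⟩ := (ih _ hlen').mp hcam
        exact ⟨l, hl.trans (List.eraseIdx_sublist cosas i), hgood⟩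
      · rintro ⟨l, hl, h1, h2⟩
        by_cases he : l = cosas
        · subst he; exact absurd ⟨h1, h2⟩ hc
        · obtain ⟨i, hilt, hsub⟩ := sublist_eraseIdx_of_ne hl he
          have hlen' : (cosas.eraseIdx i).length ≤ n := by
            rw [List.length_eraseIdx_of_lt hilt]; omega
          refine ⟨⟨i, List.mem_range.mpr hilt⟩, List.mem_attach _ _, ?_⟩
          rw [← List.eraseIdx_eq_take_drop_succ]
          exact (ih _ hlen').mpr ⟨l, hsub, h1, h2⟩

-- ===== VERDICT (by name: the statement is the Claim_ definition above) =====
theorem camion_spec : Claim_equal_camion := by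
  intro precio volumen cosas _
  unfold Spec_camion
  rw [Bool.eq_iff_iff]
  exact (camion_iff_aux precio volumen cosas.length cosas le_rfl).trans
    (camion_alt_iff precio volumen cosas).symm
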